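-- pv_equiv track=rewrite | github.com/edoardottt/programming-fundamentals | Workbook/Sets/Sets_5/program.py | es44
-- ===== SOURCE A (Python) =====
-- def es44(a, b):
--     '''
--     Si progetti la funzione es44(a,b) che,  in input due interi a e b restituisce
--     l'insieme dei primi a interi che hanno esattamente b divisori.
--     Ad esempio per a=20 e b=2 la funzione deve restituire l'insieme dei primi 20 numeri primi
--     (perche' solo i numeri primi hanno esattamente 2 divisori), vale a dire:
--     {2, 3, 67, 5, 37, 7, 71, 41, 11, 43, 13, 47, 17, 19, 61, 53, 23, 59, 29, 31}
--     '''
--     goon = True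
--     insieme = set()
--     i = 2
--     while goon:
--         divisori = set()
--         for j in range(1,i+1):
--             if i%j==0:
--                 divisori.add(j)
--         if len(divisori)==b:
--             insieme.add(i)
--         i+=1
--         if len(insieme)==a: goon=False
--     return insieme
-- ===== SOURCE B (Python) =====
-- def _num_divisors(n):
--     # number of divisors via trial-division prime factorization: prod of (exponent+1)
--     count = 1
--     d = 2
--     while d * d <= n:
--         e = 0
--         while n % d == 0:
--             n //= d
--             e += 1
--         count *= e + 1
--         d += 1
--     if n > 1:
--         count *= 2
--     return count
--
-- def es44(a, b):
--     goon = True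
--     insieme = set()
--     i = 2
--     while goon:
--         if _num_divisors(i) == b:
--             insieme.add(i)
--         i += 1
--         if len(insieme) == a:
--             goon = False
--     return insieme
-- ===== Notes on version B (the rewrite author's own statement) =====
-- stated objective: alternative
-- what changed: B replaces A's inner full scan j=1..i collecting all divisors of i into a set by trial-division prime factorization of i (divide out each d while d*d<=i, counting exponents) and computes the divisor count as the product of (exponent+1); the outer search loop is kept.
import Mathlib
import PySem

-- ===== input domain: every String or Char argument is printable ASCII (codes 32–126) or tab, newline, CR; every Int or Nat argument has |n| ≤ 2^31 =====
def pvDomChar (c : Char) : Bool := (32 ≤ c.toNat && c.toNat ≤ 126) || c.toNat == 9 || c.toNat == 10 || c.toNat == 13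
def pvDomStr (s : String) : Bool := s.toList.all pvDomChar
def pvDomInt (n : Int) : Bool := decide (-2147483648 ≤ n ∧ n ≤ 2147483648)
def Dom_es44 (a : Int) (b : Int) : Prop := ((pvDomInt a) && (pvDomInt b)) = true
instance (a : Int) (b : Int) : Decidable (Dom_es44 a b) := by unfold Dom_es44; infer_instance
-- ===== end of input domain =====

-- B replaces A's inner full divisor-set scan by trial-division prime factorization
-- (product of exponent+1); the outer search loop is unchanged. Objective: alternative.
-- The loops are modelled with a fuel parameter large enough for every terminating input.

-- ===== PORT A =====
-- inner 'for j in range(1, i+1): if i%j==0: divisori.add(j)'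
def es44Divisori (i : Int) : PySem.Set Int :=
  (PySem.List.pyRange 1 (i + 1) 1).foldl
    (fun divisori j => if PySem.Int.mod i j == 0 then PySem.Set.add divisori j else divisori)
    PySem.Set.empty

-- the 'while goon' loop of A (fuel bounds the number of iterations; 2^(a*b)+1 suffices
-- on every input where the Python loop terminates, since the a-th number with exactly
-- b divisors is at most (2^a)^(b-1))
def es44Loop (b : Int) (a : Int) : Nat → PySem.Set Int → Int → PySem.Set Int
  | 0, insieme, _ => insieme
  | Nat.succ fuel, insieme, i =>
    let divisori := es44Divisori i
    let insieme' := if PySem.Set.len divisori == b then PySem.Set.add insieme i else insieme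
    if PySem.Set.len insieme' == a then insieme' else es44Loop b a fuel insieme' (i + 1)

def es44 (a : Int) (b : Int) : List Int :=
  es44Loop b a (2 ^ (a.toNat * b.toNat) + 1) PySem.Set.empty 2

-- ===== PORT B =====
-- inner 'while n % d == 0: n //= d; e += 1' of _num_divisors; returns (n, e).
-- The while loops are modelled with a fuel argument; fuel n.toNat is provably enough
-- (each division strictly shrinks n; the outer d stops at sqrt n), see the lemmas below.
def es44DivideOut : Nat → Int → Int → Int → Int × Int
  | 0, n, _, e => (n, e)
  | Nat.succ fuel, n, d, e =>
    if PySem.Int.mod n d == 0 then es44DivideOut fuel (PySem.Int.floordiv n d) d (e + 1)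
    else (n, e)

-- 'while d * d <= n' loop of _num_divisors, accumulating count
def es44NdLoop : Nat → Int → Int → Int → Int
  | 0, n, _, count => if 1 < n then count * 2 else count
  | Nat.succ fuel, n, d, count =>
    if d * d ≤ n then
      let p := es44DivideOut n.toNat n d 0
      es44NdLoop fuel p.1 (d + 1) (count * (p.2 + 1))
    else if 1 < n then count * 2 else count

def es44NumDivisors (n : Int) : Int := es44NdLoop n.toNat n 2 1

-- the 'while goon' loop of B (same outer loop, same fuel; only the divisor count differs)
def es44AltLoop (b : Int) (a : Int) : Nat → PySem.Set Int → Int → PySem.Set Int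
  | 0, insieme, _ => insieme
  | Nat.succ fuel, insieme, i =>
    let insieme' := if es44NumDivisors i == b then PySem.Set.add insieme i else insieme
    if PySem.Set.len insieme' == a then insieme' else es44AltLoop b a fuel insieme' (i + 1)

def es44_alt (a : Int) (b : Int) : List Int :=
  es44AltLoop b a (2 ^ (a.toNat * b.toNat) + 1) PySem.Set.empty 2

-- ===== PRECONDITION & SPEC =====
-- (no Pre_: the two ports agree on every input; A's non-terminating inputs are modelled
-- by both ports with the same fuel, so the equality is unconditional)
def Spec_es44 (a : Int) (b : Int) (out : List Int) : Prop := out = es44_alt a b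
instance (a : Int) (b : Int) (out : List Int) : Decidable (Spec_es44 a b out) := by unfold Spec_es44; infer_instance

-- ===== CLAIM (what is proved, stated in full; the proofs are below) =====
def Claim_equal_es44 : Prop := ∀ (a : Int) (b : Int), Dom_es44 a b → Spec_es44 a b (es44 a b)

-- ===== LEMMAS AND PROOFS =====

-- A's inner loop builds the set of the pairwise-distinct range elements passing the test
theorem es44_foldl_add_filter (p : Int → Bool) :
    ∀ (l : List Int) (s : PySem.Set Int), l.Nodup → (∀ x ∈ l, x ∉ s) →
      l.foldl (fun s j => if p j then PySem.Set.add s j else s) s = s ++ l.filter p := by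
  intro l
  induction l with
  | nil => intro s _ _; simp
  | cons a l ih =>
    intro s hnd hfresh
    simp only [List.foldl_cons, List.filter_cons]
    by_cases hpa : p a
    · rw [if_pos hpa, if_pos hpa,
        PySem.Set.add_of_not_mem (hfresh a (List.mem_cons_self))]
      rw [ih (s ++ [a]) hnd.of_cons]
      · simp
      · intro x hx
        simp only [List.mem_append, List.mem_singleton]
        rintro (hxs | rfl)
        · exact hfresh x (List.mem_cons_of_mem _ hx) hxs
        · exact (List.nodup_cons.mp hnd).1 hx
    · rw [if_neg (by simp [hpa]), if_neg (by simp [hpa])]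
      exact ih s hnd.of_cons (fun x hx => hfresh x (List.mem_cons_of_mem _ hx))

theorem es44_card_divisors_range (N : Nat) (hN : N ≠ 0) :
    ((Finset.range N).filter (fun k => (k + 1) ∣ N)).card = (Nat.divisors N).card := by
  apply Finset.card_bij (fun k _ => k + 1)
  · intro a ha
    simp only [Finset.mem_filter, Finset.mem_range] at ha
    simp [Nat.mem_divisors, hN, ha.2]
  · intro a _ b _ h; omega
  · intro j hj
    simp only [Nat.mem_divisors] at hj
    have hj1 : 1 ≤ j := Nat.one_le_iff_ne_zero.mpr (by rintro rfl; exact hN (Nat.eq_zero_of_zero_dvd hj.1))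
    refine ⟨j - 1, ?_, by omega⟩
    simp only [Finset.mem_filter, Finset.mem_range]
    have := Nat.le_of_dvd (Nat.pos_of_ne_zero hN) hj.1
    constructor
    · omega
    · have hje : j - 1 + 1 = j := by omega
      rw [hje]; exact hj.1

-- length of A's divisor set = d(i), the number-of-divisors function
theorem es44Divisori_len (i : Int) (hi : 1 ≤ i) :
    PySem.Set.len (es44Divisori i) = ((Nat.divisors i.toNat).card : Int) := by
  lift i to Nat using (by omega : (0:Int) ≤ i) with N
  have hN : N ≠ 0 := by omega
  simp only [Int.toNat_natCast]
  have hr : PySem.List.pyRange 1 ((N:Int) + 1) 1 =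
      (List.range N).map (fun k : Nat => (1 : Int) + k) := by
    rw [PySem.List.pyRange_one, show ((N:Int) + 1 - 1) = (N:Int) from by ring]
    simp
  unfold es44Divisori
  rw [hr, es44_foldl_add_filter _ _ PySem.Set.empty
    (by rw [← hr]; exact PySem.List.nodup_pyRange_one 1 ((N:Int)+1))
    (by intro x _ hx; simp [PySem.Set.empty] at hx)]
  rw [List.filter_map]
  have hfc : (List.range N).filter
        ((fun j => PySem.Int.mod (N:Int) j == 0) ∘ (fun k : Nat => (1:Int) + k))
      = (List.range N).filter (fun k => decide ((k + 1) ∣ N)) := by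
    apply List.filter_congr
    intro k _
    show (PySem.Int.mod (N:Int) (1 + (k:Int)) == 0) = decide ((k+1) ∣ N)
    rw [Bool.eq_iff_iff]
    simp only [beq_iff_eq, decide_eq_true_eq]
    rw [PySem.Int.mod_eq_zero_iff_dvd,
      show (1+(k:Int)) = ((k+1 : Nat) : Int) by push_cast; ring, Int.natCast_dvd_natCast]
  rw [hfc]
  have hcard : ((List.range N).filter (fun k => decide ((k + 1) ∣ N))).length
      = ((Finset.range N).filter (fun k => (k + 1) ∣ N)).card := rfl
  simp only [PySem.Set.len, PySem.Set.empty, List.nil_append, List.length_map, hcard,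
    es44_card_divisors_range N hN]

-- d(m * p^k) = d(m) * (k+1) for p prime not dividing m
theorem es44_card_prime_pow_mul (N' D : Nat) (k : Nat) (hp : D.Prime) (hndvd : ¬ D ∣ N') :
    (Nat.divisors (N' * D ^ k)).card = (Nat.divisors N').card * (k + 1) := by
  have hcop : N'.Coprime (D ^ k) :=
    Nat.Coprime.pow_right k (((Nat.Prime.coprime_iff_not_dvd hp).mpr hndvd).symm)
  rw [Nat.Coprime.card_divisors_mul hcop]
  congr 1
  rw [Nat.divisors_prime_pow hp k, Finset.card_map, Finset.card_range]

-- es44DivideOut divides d out completely: result (n', e + k) with n = n' * d^k, d not dividing n'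
theorem es44DivideOut_spec (d : Int) (hd : 2 ≤ d) :
    ∀ (F : Nat) (n e : Int), n.toNat ≤ F → 1 ≤ n →
      ∃ (n' : Int) (k : Nat), es44DivideOut F n d e = (n', e + k) ∧ n = n' * d ^ k ∧ ¬ d ∣ n' ∧ 1 ≤ n' := by
  intro F
  induction F with
  | zero => intro n e hF hn; omega
  | succ F ih =>
    intro n e hF hn
    simp only [es44DivideOut]
    by_cases h : PySem.Int.mod n d = 0
    · rw [if_pos (by simpa using h)]
      obtain ⟨k0, hk0⟩ := (PySem.Int.mod_eq_zero_iff_dvd n d).mp h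
      have h1 : 1 ≤ k0 := by nlinarith
      have hq : PySem.Int.floordiv n d = k0 := by
        rw [PySem.Int.floordiv_eq_ediv_of_pos (by omega : (0:Int) < d), hk0,
          Int.mul_ediv_cancel_left _ (by omega : d ≠ 0)]
      have hlt : k0 < n := by nlinarith
      obtain ⟨n', k, heq, hmul, hndvd, hn'⟩ := ih (PySem.Int.floordiv n d) (e + 1)
        (by rw [hq]; omega) (by rw [hq]; omega)
      refine ⟨n', k + 1, ?_, ?_, hndvd, hn'⟩
      · rw [heq]; congr 1; push_cast; ring
      · rw [hq] at hmul
        rw [hk0, hmul]; ring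
    · rw [if_neg (by simpa using h)]
      refine ⟨n, 0, by simp, by ring, ?_, hn⟩
      intro hdvd
      exact h ((PySem.Int.mod_eq_zero_iff_dvd n d).mpr hdvd)

-- if no m < d divides n and the fuel covers the remaining trial divisors,
-- es44NdLoop returns count * d(n)
theorem es44NdLoop_eq : ∀ (F : Nat) (n d count : Int), (n + 2 - d).toNat ≤ F → 1 ≤ n → 2 ≤ d →
    (∀ m : Int, 2 ≤ m → m < d → ¬ m ∣ n) →
    es44NdLoop F n d count = count * ((Nat.divisors n.toNat).card : Int) := by
  have base : ∀ (n d count : Int), 1 ≤ n → 2 ≤ d → ¬ d * d ≤ n →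
      (∀ m : Int, 2 ≤ m → m < d → ¬ m ∣ n) →
      (if 1 < n then count * 2 else count) = count * ((Nat.divisors n.toNat).card : Int) := by
    intro n d count hn hd hdd hinv
    by_cases h1 : 1 < n
    · have hprime : Nat.Prime n.toNat := by
        by_contra hnp
        have hsq := Nat.minFac_sq_le_self (by omega : 0 < n.toNat) hnp
        have hp := Nat.minFac_prime (by omega : n.toNat ≠ 1)
        have hpd : (n.toNat.minFac : Int) ∣ n := by
          have h2 := Int.natCast_dvd_natCast.mpr (Nat.minFac_dvd n.toNat)
          rwa [Int.toNat_of_nonneg (by omega)] at h2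
        have hlt : (n.toNat.minFac : Int) < d := by
          by_contra hge
          push Not at hge
          have hsq2 : d * d ≤ (n.toNat.minFac : Int) * (n.toNat.minFac : Int) := by nlinarith
          have h3 : ((n.toNat.minFac ^ 2 : Nat) : Int) ≤ ((n.toNat : Nat) : Int) := by exact_mod_cast hsq
          push_cast at h3
          rw [Int.toNat_of_nonneg (by omega)] at h3
          nlinarith
        exact hinv _ (by exact_mod_cast hp.two_le) hlt hpd
      rw [if_pos h1, Nat.Prime.divisors hprime, Finset.card_pair (by
        have := hprime.two_le; omega)]
      norm_num
    · have hn1 : n = 1 := by omega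
      subst hn1
      norm_num
  intro F
  induction F with
  | zero =>
    intro n d count hF hn hd hinv
    simp only [es44NdLoop]
    have hdd : ¬ d * d ≤ n := by
      intro hdd
      have : d ≤ n := by nlinarith
      omega
    exact base n d count hn hd hdd hinv
  | succ F ih =>
    intro n d count hF hn hd hinv
    simp only [es44NdLoop]
    by_cases h : d * d ≤ n
    · rw [if_pos h]
      obtain ⟨n', k, heq, hmul, hndvd, hn'⟩ := es44DivideOut_spec d hd n.toNat n 0 (le_refl _) hn
      have hdn : d ≤ n := by nlinarith
      simp only [heq]
      have hinv' : ∀ m : Int, 2 ≤ m → m < d + 1 → ¬ m ∣ n' := by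
        intro m hm2 hmd hdvd
        rcases lt_or_eq_of_le (by omega : m ≤ d) with hlt | hmeq
        · exact hinv m hm2 hlt (hdvd.trans ⟨d ^ k, hmul⟩)
        · exact hndvd (hmeq ▸ hdvd)
      have hn'le : n' ≤ n := by
        have hpow : (1:Int) ≤ d ^ k := one_le_pow₀ (by omega)
        nlinarith
      have hrec := ih n' (d + 1) (count * (0 + k + 1)) (by omega) hn' (by omega) hinv'
      rw [show ((0:Int) + (k:Int) + 1) = (0 + k + 1) from rfl] at hrec
      rw [hrec]
      rcases Nat.eq_zero_or_pos k with hk0 | hkpos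
      · subst hk0
        have : n' = n := by rw [hmul]; ring
        subst this
        push_cast
        ring
      · have hdprime : Nat.Prime d.toNat := by
          by_contra hnp
          obtain ⟨m, hmdvd, hm2, hmlt⟩ := Nat.exists_dvd_of_not_prime2 (by omega) hnp
          have hmd : (m : Int) ∣ d := by
            have := Int.natCast_dvd_natCast.mpr hmdvd
            rwa [Int.toNat_of_nonneg (by omega)] at this
          have hdvdn : (m : Int) ∣ n := hmd.trans (by
            refine Dvd.intro_left (n' * d ^ (k - 1)) ?_
            rw [hmul]
            have : d ^ k = d ^ (k - 1) * d := by
              rw [← pow_succ]; congr 1; omega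
            rw [this]; ring)
          exact hinv m (by exact_mod_cast hm2) (by omega) hdvdn
        have hNmul : n.toNat = n'.toNat * d.toNat ^ k := by
          have h1 : (n'.toNat : Int) = n' := Int.toNat_of_nonneg (by omega)
          have h2 : (d.toNat : Int) = d := Int.toNat_of_nonneg (by omega)
          have h3 : ((n'.toNat * d.toNat ^ k : Nat) : Int) = n := by
            push_cast
            rw [h1, h2]
            exact hmul.symm
          omega
        rw [hNmul, es44_card_prime_pow_mul n'.toNat d.toNat k hdprime
          (by intro hdvd; exact hndvd (by
            have := Int.natCast_dvd_natCast.mpr hdvd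
            rwa [Int.toNat_of_nonneg (by omega : (0:Int) ≤ d), Int.toNat_of_nonneg (by omega)] at this))]
        push_cast
        ring
    · rw [if_neg h]
      exact base n d count hn hd h hinv

-- the two divisor counts agree on every i ≥ 1
theorem es44_counts_agree (i : Int) (hi : 1 ≤ i) :
    PySem.Set.len (es44Divisori i) = es44NumDivisors i := by
  rw [es44Divisori_len i hi]
  unfold es44NumDivisors
  rw [es44NdLoop_eq i.toNat i 2 1 (by omega) hi (le_refl _)
    (by intro m hm2 hmlt _; omega)]
  ring

-- the outer loops are step-for-step identical once the inner counts agree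
theorem es44_loops_agree (b a : Int) :
    ∀ (fuel : Nat) (s : PySem.Set Int) (i : Int), 1 ≤ i →
      es44Loop b a fuel s i = es44AltLoop b a fuel s i := by
  intro fuel
  induction fuel with
  | zero => intro s i _; rfl
  | succ fuel ih =>
    intro s i hi
    simp only [es44Loop, es44AltLoop, es44_counts_agree i hi]
    exact if_congr Iff.rfl rfl (ih _ (i + 1) (by omega))

-- ===== VERDICT (by name: the statement is the Claim_ definition above) =====
theorem es44_spec : Claim_equal_es44 := by
  unfold Claim_equal_es44
  intro a b _
  unfold Spec_es44 es44 es44_alt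
  exact es44_loops_agree b a _ PySem.Set.empty 2 (by omega)
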